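-- pv_equiv track=rewrite | github.com/wloops/ai-rag-agent-api | app/utils/text_splitter.py | iter_chunk_ranges
-- ===== SOURCE A (Python) =====
-- def _validate_split_args(chunk_size: int, overlap: int) -> None:
--     if chunk_size <= 0:
--         raise ValueError("chunk_size must be greater than 0")
--     if overlap < 0:
--         raise ValueError("overlap must be greater than or equal to 0")
--     if overlap >= chunk_size:
--         raise ValueError("overlap must be less than chunk_size")
--
-- def iter_chunk_ranges(
--     text: str | None, chunk_size: int = 700, overlap: int = 100
-- ) -> list[tuple[int, int]]:
--     _validate_split_args(chunk_size, overlap)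
--
--     if text is None:
--         return []
--
--     if not text.strip():
--         return []
--
--     ranges: list[tuple[int, int]] = []
--     text_length = len(text)
--     start = 0
--     step = chunk_size - overlap
--
--     while start < text_length:
--         end = min(start + chunk_size, text_length)
--         ranges.append((start, end))
--
--         if end >= text_length:
--             break
--
--         next_start = start + step
--         # chunk_size 表示单个 chunk 的最大字符窗口。
--         # overlap 表示相邻 chunk 之间保留的重叠字符数，用来减少语义断裂。
--         # 这里强制保证下一轮起点持续前进，避免边界条件导致死循环。
--         if next_start <= start:
--             next_start = end
--
--         start = next_start
--
--     return ranges
-- ===== SOURCE B (Python) =====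
-- def _validate_split_args(chunk_size: int, overlap: int) -> None:
--     if chunk_size <= 0:
--         raise ValueError("chunk_size must be greater than 0")
--     if overlap < 0:
--         raise ValueError("overlap must be greater than or equal to 0")
--     if overlap >= chunk_size:
--         raise ValueError("overlap must be less than chunk_size")
--
--
-- def iter_chunk_ranges(
--     text: str | None, chunk_size: int = 700, overlap: int = 100
-- ) -> list[tuple[int, int]]:
--     _validate_split_args(chunk_size, overlap)
--
--     if text is None:
--         return []
--     if not text.strip():
--         return []
--
--     text_length = len(text)
--     step = chunk_size - overlap
--     # closed-form chunk count instead of iterating until the end is reached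
--     if text_length <= chunk_size:
--         n = 1
--     else:
--         n = (text_length - chunk_size + step - 1) // step + 1
--     return [(i * step, min(i * step + chunk_size, text_length)) for i in range(n)]
-- ===== Notes on version B (the rewrite author's own statement) =====
-- stated objective: alternative
-- what changed: Replaces the while-loop that discovers the number of chunks by stepping and breaking with a closed-form ceiling-division chunk count followed by a single range comprehension.
import Mathlib
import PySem

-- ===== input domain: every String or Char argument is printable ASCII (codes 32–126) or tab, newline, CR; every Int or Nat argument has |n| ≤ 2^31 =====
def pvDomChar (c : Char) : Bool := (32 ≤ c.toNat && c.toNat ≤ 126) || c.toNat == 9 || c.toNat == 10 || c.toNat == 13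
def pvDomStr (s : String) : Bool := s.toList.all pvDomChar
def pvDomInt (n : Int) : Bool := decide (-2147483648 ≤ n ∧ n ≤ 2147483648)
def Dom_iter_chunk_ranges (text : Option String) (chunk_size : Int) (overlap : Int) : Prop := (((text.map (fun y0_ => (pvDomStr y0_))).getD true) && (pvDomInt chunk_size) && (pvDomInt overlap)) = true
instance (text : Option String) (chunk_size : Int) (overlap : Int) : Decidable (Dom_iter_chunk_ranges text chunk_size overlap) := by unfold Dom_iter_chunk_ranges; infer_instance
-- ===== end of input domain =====

-- B replaces A's while-loop (step, append, break) with a closed-form ceiling-division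
-- chunk count and a single range comprehension producing the same (start, end) pairs.


-- ===== PORT A =====
-- A's while-loop ('end' and 'next_start' inlined); fuel only makes the recursion total
-- (under Pre_ it never runs out)
def pvALoop (text_length chunk_size step : Int) : Nat → Int → List (Int × Int) → List (Int × Int)
  | 0, _, ranges => ranges
  | fuel + 1, start, ranges =>
    if start < text_length then
      if min (start + chunk_size) text_length ≥ text_length then
        ranges ++ [(start, min (start + chunk_size) text_length)]
      else
        pvALoop text_length chunk_size step fuel
          (if start + step ≤ start then min (start + chunk_size) text_length
           else start + step)
          (ranges ++ [(start, min (start + chunk_size) text_length)])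
    else ranges

def iter_chunk_ranges (text : Option String) (chunk_size : Int) (overlap : Int) : List (Int × Int) :=
  -- _validate_split_args raises ValueError outside Pre_; the port's value there is irrelevant
  if chunk_size ≤ 0 then []
  else if overlap < 0 then []
  else if chunk_size ≤ overlap then []
  else
    match text with
    | none => []
    | some t =>
      if PySem.Str.strip t = "" then []
      else
        pvALoop (PySem.Str.len t) chunk_size (chunk_size - overlap)
          ((PySem.Str.len t).toNat + 1) 0 []

-- ===== PORT B =====
def iter_chunk_ranges_alt (text : Option String) (chunk_size : Int) (overlap : Int) : List (Int × Int) :=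
  if chunk_size ≤ 0 then []
  else if overlap < 0 then []
  else if chunk_size ≤ overlap then []
  else
    match text with
    | none => []
    | some t =>
      if PySem.Str.strip t = "" then []
      else
        let text_length := PySem.Str.len t
        let step := chunk_size - overlap
        let n : Int :=
          if text_length ≤ chunk_size then 1
          else PySem.Int.floordiv (text_length - chunk_size + step - 1) step + 1
        (PySem.List.pyRange 0 n 1).map
          (fun i => (i * step, min (i * step + chunk_size) text_length))

-- ===== PRECONDITION & SPEC =====
-- Pre_ excludes exactly the arguments on which _validate_split_args raises ValueError.
def Pre_iter_chunk_ranges (text : Option String) (chunk_size : Int) (overlap : Int) : Prop :=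
  0 < chunk_size ∧ 0 ≤ overlap ∧ overlap < chunk_size
instance (text : Option String) (chunk_size : Int) (overlap : Int) : Decidable (Pre_iter_chunk_ranges text chunk_size overlap) := by unfold Pre_iter_chunk_ranges; infer_instance

def pvWitness_iter_chunk_ranges : Option String × Int × Int := (some "hello world", 4, 1)

def Spec_iter_chunk_ranges (text : Option String) (chunk_size : Int) (overlap : Int) (out : List (Int × Int)) : Prop := out = iter_chunk_ranges_alt text chunk_size overlap
instance (text : Option String) (chunk_size : Int) (overlap : Int) (out : List (Int × Int)) : Decidable (Spec_iter_chunk_ranges text chunk_size overlap out) := by unfold Spec_iter_chunk_ranges; infer_instance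

-- ===== CLAIM (what is proved, stated in full; the proofs are below) =====
def Claim_equal_iter_chunk_ranges : Prop := ∀ (text : Option String) (chunk_size : Int) (overlap : Int), Dom_iter_chunk_ranges text chunk_size overlap → Pre_iter_chunk_ranges text chunk_size overlap → Spec_iter_chunk_ranges text chunk_size overlap (iter_chunk_ranges text chunk_size overlap)

-- ===== LEMMAS AND PROOFS =====

-- the chunk count B computes
def pvN (L cs step : Int) : Int :=
  if L ≤ cs then 1 else PySem.Int.floordiv (L - cs + step - 1) step + 1

-- if the loop is at position k*step, not yet done, the previous chunk (if any) did not
-- reach the end, and the current one does, then B's count is exactly k+1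
theorem pvN_break (L cs step k : Int) (hstep : 1 ≤ step)
    (hk : 0 ≤ k) (hinv : k = 0 ∨ (k - 1) * step + cs < L)
    (hlt : k * step < L) (hend : L ≤ k * step + cs) :
    pvN L cs step = k + 1 := by
  unfold pvN
  split_ifs with h
  · -- L ≤ cs: the invariant forces k = 0
    have hk0 : k = 0 := by
      rcases hinv with rfl | hinv
      · rfl
      · by_contra hne
        have : 0 ≤ (k - 1) * step := mul_nonneg (by omega) (by omega)
        have : 0 ≤ k * step := mul_nonneg hk (by omega)
        have hke : (k - 1) * step = k * step - step := by ring
        omega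
    omega
  · have : PySem.Int.floordiv (L - cs + step - 1) step = k := by
      rw [PySem.Int.floordiv_eq_iff_of_pos (by omega)]
      have h2 : (k - 1) * step = k * step - step := by ring
      have h3 : (k + 1) * step = k * step + step := by ring
      constructor
      · rcases hinv with rfl | hinv
        · simp; omega
        · omega
      · omega
    omega

-- if the current chunk does not reach the end, the loop will go on: k < n
theorem pvN_cont (L cs step k : Int) (hstep : 1 ≤ step) (hk : 0 ≤ k)
    (hcont : k * step + cs < L) : k < pvN L cs step := by
  unfold pvN
  split_ifs with h
  · have : 0 ≤ k * step := mul_nonneg hk (by omega)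
    omega
  · have : k ≤ PySem.Int.floordiv (L - cs + step - 1) step := by
      rw [PySem.Int.le_floordiv_iff_mul_le (by omega)]
      omega
    omega

-- loop characterisation: from position k*step the loop appends exactly chunks k..n-1
theorem pvALoop_eq (L cs step : Int) (hstep : 1 ≤ step) (hsc : step ≤ cs) :
    ∀ (fuel : Nat) (k : Int) (acc : List (Int × Int)),
      0 ≤ k → k * step < L → (k = 0 ∨ (k - 1) * step + cs < L) →
      L - k * step ≤ (fuel : Int) →
      pvALoop L cs step fuel (k * step) acc =
        acc ++ (PySem.List.pyRange k (pvN L cs step) 1).map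
          (fun i => (i * step, min (i * step + cs) L)) := by
  intro fuel
  induction fuel with
  | zero => intro k acc hk hlt _ hfuel; exfalso; simp at hfuel; omega
  | succ fuel ih =>
    intro k acc hk hlt hinv hfuel
    rw [pvALoop, if_pos hlt]
    by_cases hend : L ≤ k * step + cs
    · rw [if_pos (show min (k * step + cs) L ≥ L from le_min hend le_rfl)]
      rw [pvN_break L cs step k hstep hk hinv hlt hend]
      rw [PySem.List.pyRange_one_singleton]
      simp
    · rw [not_le] at hend
      rw [if_neg (show ¬ min (k * step + cs) L ≥ L by
            have h := min_le_left (k * step + cs) L; omega)]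
      rw [if_neg (by omega)]
      have hk1 : k * step + step = (k + 1) * step := by ring
      rw [hk1, ih (k + 1) _ (by omega) (by rw [← hk1]; omega)
            (by right; have : (k + 1 - 1) * step = k * step := by ring
                omega)
            (by rw [← hk1]; push_cast at hfuel ⊢; omega)]
      rw [PySem.List.pyRange_one_cons (pvN_cont L cs step k hstep hk hend)]
      simp

-- nonblank string has positive length
theorem pvLen_pos (t : String) (h : PySem.Str.strip t ≠ "") : 1 ≤ PySem.Str.len t := by
  by_contra hL
  apply h
  have h0 : t.toList = [] := by
    have hl := PySem.Str.len_eq t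
    have : t.toList.length = 0 := by omega
    simpa using this
  have ht : t = "" := String.toList_eq_nil_iff.mp h0
  subst ht
  decide

-- ===== VERDICT (by name: the statement is the Claim_ definition above) =====
theorem iter_chunk_ranges_spec : Claim_equal_iter_chunk_ranges := by
  intro text cs ov _ hpre
  obtain ⟨h1, h2, h3⟩ := hpre
  unfold Spec_iter_chunk_ranges iter_chunk_ranges iter_chunk_ranges_alt
  rw [if_neg (by omega), if_neg (by omega), if_neg (by omega)]
  rw [if_neg (by omega), if_neg (by omega), if_neg (by omega)]
  cases text with
  | none => rfl
  | some t =>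
    dsimp only
    by_cases hb : PySem.Str.strip t = ""
    · rw [if_pos hb, if_pos hb]
    · rw [if_neg hb, if_neg hb]
      have hL : 1 ≤ PySem.Str.len t := pvLen_pos t hb
      have := pvALoop_eq (PySem.Str.len t) cs (cs - ov) (by omega) (by omega)
        ((PySem.Str.len t).toNat + 1) 0 [] (by omega) (by simpa using hL) (Or.inl rfl)
        (by push_cast; omega)
      simpa [pvN] using this
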